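-- pv_equiv track=rewrite | github.com/SaltProphet/IsoLo | huggingface/modules/audio_analyzer.py | _get_harmonic_recommendations
-- ===== SOURCE A (Python) =====
-- KEY_TO_CAMELOT = {
--     "C Maj": "8B", "G Maj": "9B", "D Maj": "10B", "A Maj": "11B", "E Maj": "12B",
--     "B Maj": "1B", "F# Maj": "2B", "Db Maj": "3B", "Ab Maj": "4B", "Eb Maj": "5B",
--     "Bb Maj": "6B", "F Maj": "7B",
--     "A Min": "8A", "E Min": "9A", "B Min": "10A", "F# Min": "11A", "C# Min": "12A",
--     "G# Min": "1A", "D# Min": "2A", "Bb Min": "3A", "F Min": "4A", "C Min": "5A",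
--     "G Min": "6A", "D Min": "7A",
-- }
--
-- CAMELOT_TO_KEY = {v: k for k, v in KEY_TO_CAMELOT.items()}
--
-- def _get_harmonic_recommendations(key_str: str) -> str:
--     """Get harmonically compatible keys based on Camelot wheel."""
--     code = KEY_TO_CAMELOT.get(key_str, "N/A")
--     if code == "N/A":
--         return "N/A (Key not recognized)"
--
--     try:
--         num = int(code[:-1])
--         mode = code[-1]
--         opposite_mode = 'B' if mode == 'A' else 'A'
--         num_plus_one = (num % 12) + 1
--         num_minus_one = 12 if num == 1 else num - 1
--
--         recs_codes = [
--             f"{num}{opposite_mode}",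
--             f"{num_plus_one}{mode}",
--             f"{num_minus_one}{mode}"
--         ]
--
--         rec_keys = [f"{CAMELOT_TO_KEY.get(r_code, f'Code {r_code}')} ({r_code})" for r_code in recs_codes]
--         return " | ".join(rec_keys)
--     except Exception:
--         return "N/A (Error calculating recommendations)"
-- ===== SOURCE B (Python) =====
-- # Fully precomputed Camelot-wheel table: each of the 24 valid keys maps directly
-- # to its final recommendation string; the function is one dict lookup.
-- RECS = {
--     "C Maj": "A Min (8A) | G Maj (9B) | F Maj (7B)",
--     "G Maj": "E Min (9A) | D Maj (10B) | C Maj (8B)",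
--     "D Maj": "B Min (10A) | A Maj (11B) | G Maj (9B)",
--     "A Maj": "F# Min (11A) | E Maj (12B) | D Maj (10B)",
--     "E Maj": "C# Min (12A) | B Maj (1B) | A Maj (11B)",
--     "B Maj": "G# Min (1A) | F# Maj (2B) | E Maj (12B)",
--     "F# Maj": "D# Min (2A) | Db Maj (3B) | B Maj (1B)",
--     "Db Maj": "Bb Min (3A) | Ab Maj (4B) | F# Maj (2B)",
--     "Ab Maj": "F Min (4A) | Eb Maj (5B) | Db Maj (3B)",
--     "Eb Maj": "C Min (5A) | Bb Maj (6B) | Ab Maj (4B)",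
--     "Bb Maj": "G Min (6A) | F Maj (7B) | Eb Maj (5B)",
--     "F Maj": "D Min (7A) | C Maj (8B) | Bb Maj (6B)",
--     "A Min": "C Maj (8B) | E Min (9A) | D Min (7A)",
--     "E Min": "G Maj (9B) | B Min (10A) | A Min (8A)",
--     "B Min": "D Maj (10B) | F# Min (11A) | E Min (9A)",
--     "F# Min": "A Maj (11B) | C# Min (12A) | B Min (10A)",
--     "C# Min": "E Maj (12B) | G# Min (1A) | F# Min (11A)",
--     "G# Min": "B Maj (1B) | D# Min (2A) | C# Min (12A)",
--     "D# Min": "F# Maj (2B) | Bb Min (3A) | G# Min (1A)",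
--     "Bb Min": "Db Maj (3B) | F Min (4A) | D# Min (2A)",
--     "F Min": "Ab Maj (4B) | C Min (5A) | Bb Min (3A)",
--     "C Min": "Eb Maj (5B) | G Min (6A) | F Min (4A)",
--     "G Min": "Bb Maj (6B) | D Min (7A) | C Min (5A)",
--     "D Min": "F Maj (7B) | A Min (8A) | G Min (6A)",
-- }
--
--
-- def _get_harmonic_recommendations(key_str: str) -> str:
--     return RECS.get(key_str, "N/A (Key not recognized)")
-- ===== Notes on version B (the rewrite author's own statement) =====
-- stated objective: simpler
-- what changed: B replaces all call-time Camelot parsing, modular arithmetic and string formatting with a single literal 24-entry dict mapping each valid key directly to its final recommendation string; the function body is one dict lookup with a default.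
import Mathlib
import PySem

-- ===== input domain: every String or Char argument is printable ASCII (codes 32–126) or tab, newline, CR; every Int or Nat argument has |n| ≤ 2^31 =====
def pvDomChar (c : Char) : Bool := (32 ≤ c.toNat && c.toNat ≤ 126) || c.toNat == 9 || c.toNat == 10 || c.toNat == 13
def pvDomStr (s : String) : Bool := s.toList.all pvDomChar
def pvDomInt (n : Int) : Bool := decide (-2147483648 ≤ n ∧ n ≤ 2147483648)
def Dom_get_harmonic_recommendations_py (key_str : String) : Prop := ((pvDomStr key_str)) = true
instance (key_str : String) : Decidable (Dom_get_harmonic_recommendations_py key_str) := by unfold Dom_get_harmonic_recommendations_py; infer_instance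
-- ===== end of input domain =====

-- B replaces A's call-time Camelot parsing/arithmetic/formatting with one literal
-- 24-entry lookup table mapping each valid key to its final string (objective: simpler).

-- ===== PORT A =====
def KEY_TO_CAMELOT : PySem.Dict String String := PySem.Dict.ofList [("C Maj", "8B"), ("G Maj", "9B"), ("D Maj", "10B"), ("A Maj", "11B"), ("E Maj", "12B"), ("B Maj", "1B"), ("F# Maj", "2B"), ("Db Maj", "3B"), ("Ab Maj", "4B"), ("Eb Maj", "5B"), ("Bb Maj", "6B"), ("F Maj", "7B"), ("A Min", "8A"), ("E Min", "9A"), ("B Min", "10A"), ("F# Min", "11A"), ("C# Min", "12A"), ("G# Min", "1A"), ("D# Min", "2A"), ("Bb Min", "3A"), ("F Min", "4A"), ("C Min", "5A"), ("G Min", "6A"), ("D Min", "7A")]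

def CAMELOT_TO_KEY : PySem.Dict String String :=
  PySem.Dict.ofList (KEY_TO_CAMELOT.items.map (fun p => (p.2, p.1)))

def get_harmonic_recommendations_py (key_str : String) : String :=
  let code := KEY_TO_CAMELOT.getD key_str "N/A"
  if code = "N/A" then "N/A (Key not recognized)"
  else
    -- try: int(code[:-1]) and code[-1]; the except branch is the fallthrough
    match PySem.Int.ofStr? (PySem.Str.slice code none (some (-1))), PySem.Str.pyGet? code (-1) with
    | some num, some mode =>
        let opposite_mode : Char := if mode = 'A' then 'B' else 'A'
        let num_plus_one := (PySem.Int.mod num 12) + 1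
        let num_minus_one := if num = 1 then 12 else num - 1
        let recs_codes := [PySem.Int.toStr num ++ String.ofList [opposite_mode],
                           PySem.Int.toStr num_plus_one ++ String.ofList [mode],
                           PySem.Int.toStr num_minus_one ++ String.ofList [mode]]
        let rec_keys := recs_codes.map (fun r => CAMELOT_TO_KEY.getD r ("Code " ++ r) ++ " (" ++ r ++ ")")
        PySem.Str.join " | " rec_keys
    | _, _ => "N/A (Error calculating recommendations)"

-- ===== PORT B =====
-- B's literal table: each valid key mapped directly to its final recommendation string.
def RECS : PySem.Dict String String := PySem.Dict.ofList [
    ("C Maj", "A Min (8A) | G Maj (9B) | F Maj (7B)"),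
    ("G Maj", "E Min (9A) | D Maj (10B) | C Maj (8B)"),
    ("D Maj", "B Min (10A) | A Maj (11B) | G Maj (9B)"),
    ("A Maj", "F# Min (11A) | E Maj (12B) | D Maj (10B)"),
    ("E Maj", "C# Min (12A) | B Maj (1B) | A Maj (11B)"),
    ("B Maj", "G# Min (1A) | F# Maj (2B) | E Maj (12B)"),
    ("F# Maj", "D# Min (2A) | Db Maj (3B) | B Maj (1B)"),
    ("Db Maj", "Bb Min (3A) | Ab Maj (4B) | F# Maj (2B)"),
    ("Ab Maj", "F Min (4A) | Eb Maj (5B) | Db Maj (3B)"),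
    ("Eb Maj", "C Min (5A) | Bb Maj (6B) | Ab Maj (4B)"),
    ("Bb Maj", "G Min (6A) | F Maj (7B) | Eb Maj (5B)"),
    ("F Maj", "D Min (7A) | C Maj (8B) | Bb Maj (6B)"),
    ("A Min", "C Maj (8B) | E Min (9A) | D Min (7A)"),
    ("E Min", "G Maj (9B) | B Min (10A) | A Min (8A)"),
    ("B Min", "D Maj (10B) | F# Min (11A) | E Min (9A)"),
    ("F# Min", "A Maj (11B) | C# Min (12A) | B Min (10A)"),
    ("C# Min", "E Maj (12B) | G# Min (1A) | F# Min (11A)"),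
    ("G# Min", "B Maj (1B) | D# Min (2A) | C# Min (12A)"),
    ("D# Min", "F# Maj (2B) | Bb Min (3A) | G# Min (1A)"),
    ("Bb Min", "Db Maj (3B) | F Min (4A) | D# Min (2A)"),
    ("F Min", "Ab Maj (4B) | C Min (5A) | Bb Min (3A)"),
    ("C Min", "Eb Maj (5B) | G Min (6A) | F Min (4A)"),
    ("G Min", "Bb Maj (6B) | D Min (7A) | C Min (5A)"),
    ("D Min", "F Maj (7B) | A Min (8A) | G Min (6A)")]

def get_harmonic_recommendations_py_alt (key_str : String) : String :=
  RECS.getD key_str "N/A (Key not recognized)"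

-- ===== PRECONDITION & SPEC =====
def Spec_get_harmonic_recommendations_py (key_str : String) (out : String) : Prop := out = get_harmonic_recommendations_py_alt key_str
instance (key_str : String) (out : String) : Decidable (Spec_get_harmonic_recommendations_py key_str out) := by unfold Spec_get_harmonic_recommendations_py; infer_instance

-- ===== CLAIM (what is proved, stated in full; the proofs are below) =====
def Claim_equal_get_harmonic_recommendations_py : Prop := ∀ (key_str : String), Dom_get_harmonic_recommendations_py key_str → Spec_get_harmonic_recommendations_py key_str (get_harmonic_recommendations_py key_str)

-- ===== LEMMAS AND PROOFS =====
theorem unrecognized_eq (key_str : String)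
    (h1 : ¬ ("C Maj" = key_str))
    (h2 : ¬ ("G Maj" = key_str))
    (h3 : ¬ ("D Maj" = key_str))
    (h4 : ¬ ("A Maj" = key_str))
    (h5 : ¬ ("E Maj" = key_str))
    (h6 : ¬ ("B Maj" = key_str))
    (h7 : ¬ ("F# Maj" = key_str))
    (h8 : ¬ ("Db Maj" = key_str))
    (h9 : ¬ ("Ab Maj" = key_str))
    (h10 : ¬ ("Eb Maj" = key_str))
    (h11 : ¬ ("Bb Maj" = key_str))
    (h12 : ¬ ("F Maj" = key_str))
    (h13 : ¬ ("A Min" = key_str))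
    (h14 : ¬ ("E Min" = key_str))
    (h15 : ¬ ("B Min" = key_str))
    (h16 : ¬ ("F# Min" = key_str))
    (h17 : ¬ ("C# Min" = key_str))
    (h18 : ¬ ("G# Min" = key_str))
    (h19 : ¬ ("D# Min" = key_str))
    (h20 : ¬ ("Bb Min" = key_str))
    (h21 : ¬ ("F Min" = key_str))
    (h22 : ¬ ("C Min" = key_str))
    (h23 : ¬ ("G Min" = key_str))
    (h24 : ¬ ("D Min" = key_str))
    : get_harmonic_recommendations_py key_str = get_harmonic_recommendations_py_alt key_str := by
  have hA : KEY_TO_CAMELOT.getD key_str "N/A" = "N/A" := by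
    rw [show KEY_TO_CAMELOT = PySem.Dict.mk [("C Maj", "8B"), ("G Maj", "9B"), ("D Maj", "10B"), ("A Maj", "11B"), ("E Maj", "12B"), ("B Maj", "1B"), ("F# Maj", "2B"), ("Db Maj", "3B"), ("Ab Maj", "4B"), ("Eb Maj", "5B"), ("Bb Maj", "6B"), ("F Maj", "7B"), ("A Min", "8A"), ("E Min", "9A"), ("B Min", "10A"), ("F# Min", "11A"), ("C# Min", "12A"), ("G# Min", "1A"), ("D# Min", "2A"), ("Bb Min", "3A"), ("F Min", "4A"), ("C Min", "5A"), ("G Min", "6A"), ("D Min", "7A")] from by decide,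
        PySem.Dict.getD_eq_get?_getD]
    simp [PySem.Dict.get?, h1, h2, h3, h4, h5, h6, h7, h8, h9, h10, h11, h12, h13, h14, h15, h16, h17, h18, h19, h20, h21, h22, h23, h24]
  have hB : RECS.getD key_str "N/A (Key not recognized)" = "N/A (Key not recognized)" := by
    rw [show RECS = PySem.Dict.mk [("C Maj", "A Min (8A) | G Maj (9B) | F Maj (7B)"), ("G Maj", "E Min (9A) | D Maj (10B) | C Maj (8B)"), ("D Maj", "B Min (10A) | A Maj (11B) | G Maj (9B)"), ("A Maj", "F# Min (11A) | E Maj (12B) | D Maj (10B)"), ("E Maj", "C# Min (12A) | B Maj (1B) | A Maj (11B)"), ("B Maj", "G# Min (1A) | F# Maj (2B) | E Maj (12B)"), ("F# Maj", "D# Min (2A) | Db Maj (3B) | B Maj (1B)"), ("Db Maj", "Bb Min (3A) | Ab Maj (4B) | F# Maj (2B)"), ("Ab Maj", "F Min (4A) | Eb Maj (5B) | Db Maj (3B)"), ("Eb Maj", "C Min (5A) | Bb Maj (6B) | Ab Maj (4B)"), ("Bb Maj", "G Min (6A) | F Maj (7B) | Eb Maj (5B)"), ("F Maj", "D Min (7A)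 | C Maj (8B) | Bb Maj (6B)"), ("A Min", "C Maj (8B) | E Min (9A) | D Min (7A)"), ("E Min", "G Maj (9B) | B Min (10A) | A Min (8A)"), ("B Min", "D Maj (10B) | F# Min (11A) | E Min (9A)"), ("F# Min", "A Maj (11B) | C# Min (12A) | B Min (10A)"), ("C# Min", "E Maj (12B) | G# Min (1A) | F# Min (11A)"), ("G# Min", "B Maj (1B) | D# Min (2A) | C# Min (12A)"), ("D# Min", "F# Maj (2B) | Bb Min (3A) | G# Min (1A)"), ("Bb Min", "Db Maj (3B) | F Min (4A) | D# Min (2A)"), ("F Min", "Ab Maj (4B) | C Min (5A) | Bb Min (3A)"), ("C Min", "Eb Maj (5B) | G Min (6A) | F Min (4A)"), ("G Min", "Bb Maj (6B) | D Min (7A) | C Min (5A)"), ("D Min", "F Maj (7B) | A Min (8A) | G Min (6A)")] from by decide,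
        PySem.Dict.getD_eq_get?_getD]
    simp [PySem.Dict.get?, h1, h2, h3, h4, h5, h6, h7, h8, h9, h10, h11, h12, h13, h14, h15, h16, h17, h18, h19, h20, h21, h22, h23, h24]
  simp [get_harmonic_recommendations_py, get_harmonic_recommendations_py_alt, hA, hB]

-- ===== VERDICT (by name: the statement is the Claim_ definition above) =====
theorem get_harmonic_recommendations_py_spec : Claim_equal_get_harmonic_recommendations_py := by
  intro key_str _
  unfold Spec_get_harmonic_recommendations_py
  by_cases h1 : "C Maj" = key_str
  · subst h1; decide
  by_cases h2 : "G Maj" = key_str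
  · subst h2; decide
  by_cases h3 : "D Maj" = key_str
  · subst h3; decide
  by_cases h4 : "A Maj" = key_str
  · subst h4; decide
  by_cases h5 : "E Maj" = key_str
  · subst h5; decide
  by_cases h6 : "B Maj" = key_str
  · subst h6; decide
  by_cases h7 : "F# Maj" = key_str
  · subst h7; decide
  by_cases h8 : "Db Maj" = key_str
  · subst h8; decide
  by_cases h9 : "Ab Maj" = key_str
  · subst h9; decide
  by_cases h10 : "Eb Maj" = key_str
  · subst h10; decide
  by_cases h11 : "Bb Maj" = key_str
  · subst h11; decide
  by_cases h12 : "F Maj" = key_str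
  · subst h12; decide
  by_cases h13 : "A Min" = key_str
  · subst h13; decide
  by_cases h14 : "E Min" = key_str
  · subst h14; decide
  by_cases h15 : "B Min" = key_str
  · subst h15; decide
  by_cases h16 : "F# Min" = key_str
  · subst h16; decide
  by_cases h17 : "C# Min" = key_str
  · subst h17; decide
  by_cases h18 : "G# Min" = key_str
  · subst h18; decide
  by_cases h19 : "D# Min" = key_str
  · subst h19; decide
  by_cases h20 : "Bb Min" = key_str
  · subst h20; decide
  by_cases h21 : "F Min" = key_str
  · subst h21; decide
  by_cases h22 : "C Min" = key_str
  · subst h22; decide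
  by_cases h23 : "G Min" = key_str
  · subst h23; decide
  by_cases h24 : "D Min" = key_str
  · subst h24; decide
  exact unrecognized_eq key_str h1 h2 h3 h4 h5 h6 h7 h8 h9 h10 h11 h12 h13 h14 h15 h16 h17 h18 h19 h20 h21 h22 h23 h24
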